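-- pv_equiv track=rewrite | github.com/pypi-data/pypi-mirror-296 | packages/bioflow-insight/bioflow_insight-1.0.5.tar.gz/bioflow_insight-1.0.5/src/outils_graph.py | get_number_cycles
-- ===== SOURCE A (Python) =====
-- def get_number_cycles(links):
--     dico_nb_cycles = {'nb':0}
--     dfs_dico = {}
--     for node in links:
--         dfs_dico[node] = {}
--         dfs_dico[node]['visited'] = False
--         dfs_dico[node]['finished'] = False
--
--     edges_create_cycles = []
--
--     def DFS(mother):
--         if(dfs_dico[mother]["finished"]):
--             return
--         if(dfs_dico[mother]["visited"]):
--             dico_nb_cycles["nb"]+=1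
--             return "found cycle"
--         dfs_dico[mother]["visited"] = True
--         for daughter in links[mother]:
--             _ = DFS(daughter)
--             if(_ == "found cycle"):
--                 edges_create_cycles.append((mother, daughter))
--         dfs_dico[mother]["finished"] = True
--
--     for node in links:
--         DFS(node)
--     return dico_nb_cycles['nb'], edges_create_cycles
-- ===== SOURCE B (Python) =====
-- def get_number_cycles(links):
--     visited = set()
--     finished = set()
--     nb = 0
--     edges_create_cycles = []
--     for root in links:
--         if root in finished:
--             continue
--         if root in visited:
--             nb += 1
--             continue
--         visited.add(root)
--         stack = [(root, iter(links[root]))]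
--         while stack:
--             mother, it = stack[-1]
--             descended = False
--             for daughter in it:
--                 if daughter in finished:
--                     continue
--                 if daughter in visited:
--                     nb += 1
--                     edges_create_cycles.append((mother, daughter))
--                     continue
--                 visited.add(daughter)
--                 stack.append((daughter, iter(links[daughter])))
--                 descended = True
--                 break
--             if not descended:
--                 finished.add(mother)
--                 stack.pop()
--     return nb, edges_create_cycles
-- ===== Notes on version B (the rewrite author's own statement) =====
-- stated objective: alternative
-- what changed: The recursive DFS with a per-node dict of visited/finished flag dicts is replaced by an iterative DFS over an explicit stack of (node, iterator) frames with visited/finished sets; cycle edges and the count are recorded in the same pre/post order.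
import Mathlib
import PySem

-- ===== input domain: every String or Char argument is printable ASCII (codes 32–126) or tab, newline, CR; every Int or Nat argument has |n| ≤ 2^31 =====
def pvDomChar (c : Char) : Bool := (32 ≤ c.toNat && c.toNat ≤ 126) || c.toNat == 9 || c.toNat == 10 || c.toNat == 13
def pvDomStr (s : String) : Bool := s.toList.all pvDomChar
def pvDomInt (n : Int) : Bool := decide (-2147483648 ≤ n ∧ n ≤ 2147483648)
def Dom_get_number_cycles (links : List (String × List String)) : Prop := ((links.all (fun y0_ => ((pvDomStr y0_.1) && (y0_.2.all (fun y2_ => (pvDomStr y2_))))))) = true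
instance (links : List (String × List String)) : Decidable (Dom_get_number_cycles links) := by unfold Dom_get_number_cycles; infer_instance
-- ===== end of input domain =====

-- B replaces A's recursive DFS (dict of visited/finished flag dicts) by an iterative DFS over an
-- explicit stack with visited/finished sets; same traversal order, same result.

-- dict lookup links[m] shared by both ports (first match, as in the association-list encoding)
def pvLk (links : List (String × List String)) (m : String) : List String :=
  (PySem.Dict.mk links).getD m []

-- ===== PORT A =====
-- DFS(mother); the Bool result is '_ == "found cycle"'; fuel only totalizes the recursion
-- (links.length + 1 never runs out under Pre_, the proofs show).
def dfsA (links : List (String × List String)) :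
    Nat → (PySem.Dict String (Bool × Bool)) × Int × List (String × String) → String →
    ((PySem.Dict String (Bool × Bool)) × Int × List (String × String)) × Bool
  | 0, st, _ => (st, false)
  | f + 1, (d, nb, e), m =>
    let fl := d.getD m (false, false)
    if fl.2 then ((d, nb, e), false)
    else if fl.1 then ((d, nb + 1, e), true)
    else
      let st2 := (pvLk links m).foldl
        (fun acc dgt =>
          let r := dfsA links f acc dgt
          if r.2 then (r.1.1, r.1.2.1, r.1.2.2 ++ [(m, dgt)]) else r.1)
        (d.insert m (true, false), nb, e)
      ((st2.1.insert m (true, true), st2.2.1, st2.2.2), false)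

def get_number_cycles (links : List (String × List String)) : Int × (List (String × String)) :=
  let init : (PySem.Dict String (Bool × Bool)) × Int × List (String × String) :=
    (links.foldl (fun d p => d.insert p.1 (false, false)) PySem.Dict.empty, 0, [])
  let st := links.foldl (fun st p => (dfsA links (links.length + 1) st p.1).1) init
  (st.2.1, st.2.2)

-- ===== PORT B =====
-- the inner 'while stack:' loop; frames hold (mother, daughters the iterator has not yielded yet);
-- fuel decreases only when a white node is pushed, and only totalizes the loop.
def runB (links : List (String × List String)) :
    Nat → (PySem.Set String × PySem.Set String × Int × List (String × String)) →
    List (String × List String) →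
    PySem.Set String × PySem.Set String × Int × List (String × String)
  | _, st, [] => st
  | f, (v, fin, nb, e), (m, []) :: rest => runB links f (v, PySem.Set.add fin m, nb, e) rest
  | f, (v, fin, nb, e), (m, dgt :: ds) :: rest =>
    if PySem.Set.contains fin dgt then runB links f (v, fin, nb, e) ((m, ds) :: rest)
    else if PySem.Set.contains v dgt then
      runB links f (v, fin, nb + 1, e ++ [(m, dgt)]) ((m, ds) :: rest)
    else
      match f with
      | 0 => (v, fin, nb, e)
      | g + 1 =>
        runB links g (PySem.Set.add v dgt, fin, nb, e) ((dgt, pvLk links dgt) :: (m, ds) :: rest)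
  termination_by f _ stack => (f, (stack.map (fun p => p.2.length + 1)).sum)
  decreasing_by
  · exact Prod.Lex.right _ (by simp)
  · exact Prod.Lex.right _ (by simp)
  · exact Prod.Lex.right _ (by simp)
  · exact Prod.Lex.left _ _ (by omega)

def get_number_cycles_alt (links : List (String × List String)) : Int × (List (String × String)) :=
  let st := links.foldl
    (fun st p =>
      if PySem.Set.contains st.2.1 p.1 then st
      else if PySem.Set.contains st.1 p.1 then (st.1, st.2.1, st.2.2.1 + 1, st.2.2.2)
      else runB links links.length
        (PySem.Set.add st.1 p.1, st.2.1, st.2.2.1, st.2.2.2) [(p.1, pvLk links p.1)])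
    (PySem.Set.empty, PySem.Set.empty, 0, [])
  (st.2.2.1, st.2.2.2)

-- ===== PRECONDITION & SPEC =====
-- Unique keys mirror that Python's argument is a dict (duplicate-key association lists exist only
-- in the Lean encoding, not as Python inputs); every daughter must be a key, else A raises KeyError.
def Pre_get_number_cycles (links : List (String × List String)) : Prop :=
  (links.map Prod.fst).Nodup ∧ ∀ p ∈ links, ∀ x ∈ p.2, x ∈ links.map Prod.fst
instance (links : List (String × List String)) : Decidable (Pre_get_number_cycles links) := by
  unfold Pre_get_number_cycles; infer_instance

def pvWitness_get_number_cycles : (List (String × List String)) :=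
  [("a", ["b", "a"]), ("b", [])]

def Spec_get_number_cycles (links : List (String × List String)) (out : Int × (List (String × String))) : Prop := out = get_number_cycles_alt links
instance (links : List (String × List String)) (out : Int × (List (String × String))) : Decidable (Spec_get_number_cycles links out) := by unfold Spec_get_number_cycles; infer_instance

-- ===== CLAIM (what is proved, stated in full; the proofs are below) =====
def Claim_equal_get_number_cycles : Prop := ∀ (links : List (String × List String)), Dom_get_number_cycles links → Pre_get_number_cycles links → Spec_get_number_cycles links (get_number_cycles links)

-- ===== LEMMAS AND PROOFS =====

def visF (d : PySem.Dict String (Bool × Bool)) (k : String) : Bool := (d.getD k (false, false)).1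
def finF (d : PySem.Dict String (Bool × Bool)) (k : String) : Bool := (d.getD k (false, false)).2

-- number of nodes of the key list still white
def Wc (links : List (String × List String)) (d : PySem.Dict String (Bool × Bool)) : Nat :=
  (links.map Prod.fst).countP (fun k => !visF d k)

-- A's flag dict and B's two sets agree pointwise
def RelVF (d : PySem.Dict String (Bool × Bool)) (v fn : PySem.Set String) : Prop :=
  ∀ k, (visF d k = true ↔ k ∈ v) ∧ (finF d k = true ↔ k ∈ fn)

-- finished implies visited (invariant of A's states)
def FVinv (d : PySem.Dict String (Bool × Bool)) : Prop :=
  ∀ k, finF d k = true → visF d k = true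

-- the body of A's daughter loop, and the loop itself
def stepA (links : List (String × List String)) (f : Nat) (m : String)
    (acc : PySem.Dict String (Bool × Bool) × Int × List (String × String)) (dgt : String) :
    PySem.Dict String (Bool × Bool) × Int × List (String × String) :=
  let r := dfsA links f acc dgt
  if r.2 then (r.1.1, r.1.2.1, r.1.2.2 ++ [(m, dgt)]) else r.1

def loopA (links : List (String × List String)) (f : Nat)
    (st : PySem.Dict String (Bool × Bool) × Int × List (String × String)) (m : String)
    (ds : List String) : PySem.Dict String (Bool × Bool) × Int × List (String × String) :=
  ds.foldl (stepA links f m) st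

-- the state after processing a white node m whose unprocessed daughters are ds
def frameA (links : List (String × List String)) (f : Nat)
    (st : PySem.Dict String (Bool × Bool) × Int × List (String × String)) (m : String)
    (ds : List String) : PySem.Dict String (Bool × Bool) × Int × List (String × String) :=
  let s := loopA links f st m ds
  (s.1.insert m (true, true), s.2.1, s.2.2)

lemma vis_insert (d : PySem.Dict String (Bool × Bool)) (x k : String) (pr : Bool × Bool) :
    visF (d.insert x pr) k = if k = x then pr.1 else visF d k := by
  simp [visF, PySem.Dict.getD_insert]; split <;> rfl

lemma fin_insert (d : PySem.Dict String (Bool × Bool)) (x k : String) (pr : Bool × Bool) :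
    finF (d.insert x pr) k = if k = x then pr.2 else finF d k := by
  simp [finF, PySem.Dict.getD_insert]; split <;> rfl

lemma stepA_fst (links : List (String × List String)) (f : Nat) (m : String) (acc) (dgt : String) :
    (stepA links f m acc dgt).1 = (dfsA links f acc dgt).1.1 := by
  simp only [stepA]; split <;> rfl

lemma dfsA_fin (links : List (String × List String)) (f : Nat) (d) (nb : Int) (e) (m : String)
    (h : finF d m = true) : dfsA links f (d, nb, e) m = ((d, nb, e), false) := by
  cases f with
  | zero => rfl
  | succ f => simp [dfsA, show (d.getD m (false, false)).2 = true from h]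

lemma dfsA_vis (links : List (String × List String)) (f : Nat) (d) (nb : Int) (e) (m : String)
    (hf : finF d m = false) (hv : visF d m = true) :
    dfsA links (f + 1) (d, nb, e) m = ((d, nb + 1, e), true) := by
  simp [dfsA, show (d.getD m (false, false)).2 = false from hf,
    show (d.getD m (false, false)).1 = true from hv]

lemma dfsA_white (links : List (String × List String)) (f : Nat) (d) (nb : Int) (e) (m : String)
    (hf : finF d m = false) (hv : visF d m = false) :
    dfsA links (f + 1) (d, nb, e) m =
      (frameA links f (d.insert m (true, false), nb, e) m (pvLk links m), false) := by
  simp only [dfsA, frameA, loopA, show (d.getD m (false, false)).2 = false from hf,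
    show (d.getD m (false, false)).1 = false from hv, Bool.false_eq_true, if_false]
  rfl

lemma loopA_cons (links : List (String × List String)) (f : Nat) (st) (m dgt : String) (ds) :
    loopA links f st m (dgt :: ds) = loopA links f (stepA links f m st dgt) m ds := rfl

-- visited flags only ever turn true, and fin → vis is preserved, through the daughter loop …
lemma loop_pres (links : List (String × List String)) (f : Nat)
    (hdfs : ∀ (st : PySem.Dict String (Bool × Bool) × Int × List (String × String)) (m : String),
      (∀ k, visF st.1 k = true → visF (dfsA links f st m).1.1 k = true) ∧
      (FVinv st.1 → FVinv (dfsA links f st m).1.1)) :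
    ∀ (ds : List String) (st : PySem.Dict String (Bool × Bool) × Int × List (String × String))
      (m : String),
      (∀ k, visF st.1 k = true → visF (loopA links f st m ds).1 k = true) ∧
      (FVinv st.1 → FVinv (loopA links f st m ds).1) := by
  intro ds
  induction ds with
  | nil => exact fun st m => ⟨fun k h => h, fun h => h⟩
  | cons dgt ds ih =>
    intro st m
    rw [loopA_cons]
    constructor
    · intro k h
      exact (ih _ m).1 k (by rw [stepA_fst]; exact (hdfs st dgt).1 k h)
    · intro h
      exact (ih _ m).2 (by rw [stepA_fst]; exact (hdfs st dgt).2 h)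

-- … through a whole frame of a visited node …
lemma frame_pres (links : List (String × List String)) (f : Nat)
    (hdfs : ∀ (st : PySem.Dict String (Bool × Bool) × Int × List (String × String)) (m : String),
      (∀ k, visF st.1 k = true → visF (dfsA links f st m).1.1 k = true) ∧
      (FVinv st.1 → FVinv (dfsA links f st m).1.1))
    (st : PySem.Dict String (Bool × Bool) × Int × List (String × String)) (m : String)
    (ds : List String) :
    (∀ k, visF st.1 k = true → visF (frameA links f st m ds).1 k = true) ∧
    (FVinv st.1 → FVinv (frameA links f st m ds).1) := by
  have hl := loop_pres links f hdfs ds st m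
  constructor
  · intro k h
    simp only [frameA, vis_insert]
    split
    · rfl
    · exact hl.1 k h
  · intro h k hk
    simp only [frameA, vis_insert, fin_insert] at hk ⊢
    by_cases hkm : k = m
    · simp [hkm]
    · simp only [hkm, if_false] at hk ⊢
      exact hl.2 h k hk

-- … and through DFS itself.
lemma dfs_pres (links : List (String × List String)) :
    ∀ (f : Nat) (st : PySem.Dict String (Bool × Bool) × Int × List (String × String)) (m : String),
      (∀ k, visF st.1 k = true → visF (dfsA links f st m).1.1 k = true) ∧
      (FVinv st.1 → FVinv (dfsA links f st m).1.1) := by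
  intro f
  induction f with
  | zero => exact fun st m => ⟨fun k h => h, fun h => h⟩
  | succ f ih =>
    rintro ⟨d, nb, e⟩ m
    by_cases hfin : finF d m = true
    · rw [dfsA_fin links _ d nb e m hfin]; exact ⟨fun k h => h, fun h => h⟩
    · rw [Bool.not_eq_true] at hfin
      by_cases hvis : visF d m = true
      · rw [dfsA_vis links f d nb e m hfin hvis]; exact ⟨fun k h => h, fun h => h⟩
      · rw [Bool.not_eq_true] at hvis
        rw [dfsA_white links f d nb e m hfin hvis]
        have hp := frame_pres links f ih (d.insert m (true, false), nb, e) m (pvLk links m)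
        constructor
        · intro k h
          exact hp.1 k (by rw [vis_insert]; split <;> simp [h])
        · intro h
          apply hp.2
          intro k hk
          rw [fin_insert] at hk
          rw [vis_insert]
          by_cases hkm : k = m
          · simp [hkm]
          · simp only [hkm, if_false] at hk ⊢; exact h k hk

lemma Wc_mono (links : List (String × List String))
    {d d' : PySem.Dict String (Bool × Bool)}
    (h : ∀ k, visF d k = true → visF d' k = true) : Wc links d' ≤ Wc links d := by
  apply List.countP_mono_left
  intro k _ hk
  simp only [Bool.not_eq_eq_eq_not, Bool.not_true] at hk ⊢
  cases hv : visF d k with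
  | false => rfl
  | true => rw [h k hv] at hk; cases hk

lemma Wc_congr (links : List (String × List String))
    {d d' : PySem.Dict String (Bool × Bool)}
    (h : ∀ k, visF d k = visF d' k) : Wc links d = Wc links d' := by
  apply List.countP_congr
  intro k _
  rw [h k]

lemma countP_erase_one {α : Type} [DecidableEq α] (m : α) (p q : α → Bool)
    (hpm : p m = true) (hqm : q m = false) (hother : ∀ k, k ≠ m → q k = p k) :
    ∀ (l : List α), l.Nodup → m ∈ l → l.countP q + 1 = l.countP p := by
  intro l
  induction l with
  | nil => intro _ h; cases h
  | cons a l ih =>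
    intro hnd hm
    rcases List.mem_cons.1 hm with rfl | hm
    · have : l.countP q = l.countP p := by
        apply List.countP_congr
        intro k hk
        rw [hother k (fun hkm => (List.nodup_cons.1 hnd).1 (hkm ▸ hk))]
      rw [List.countP_cons, List.countP_cons, this]
      simp [hpm, hqm]
    · have ha : a ≠ m := fun h => (List.nodup_cons.1 hnd).1 (h ▸ hm)
      rw [List.countP_cons, List.countP_cons, hother a ha]
      have := ih (List.nodup_cons.1 hnd).2 hm
      split <;> omega

lemma Wc_insert_white (links : List (String × List String))
    (hnd : (links.map Prod.fst).Nodup) {d : PySem.Dict String (Bool × Bool)} {m : String}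
    (hm : m ∈ links.map Prod.fst) (hw : visF d m = false) (b : Bool) :
    Wc links (d.insert m (true, b)) + 1 = Wc links d := by
  apply countP_erase_one m _ _ (by simp [hw]) (by simp [vis_insert])
    (fun k hk => by simp [vis_insert, hk]) _ hnd hm

lemma Wc_le (links : List (String × List String)) (d : PySem.Dict String (Bool × Bool)) :
    Wc links d ≤ links.length := by
  calc Wc links d ≤ (links.map Prod.fst).length := List.countP_le_length
  _ = links.length := List.length_map ..

lemma one_le_Wc (links : List (String × List String)) {d : PySem.Dict String (Bool × Bool)}
    {m : String} (hm : m ∈ links.map Prod.fst) (hw : visF d m = false) : 1 ≤ Wc links d := by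
  rw [Nat.one_le_iff_ne_zero, ← Nat.pos_iff_ne_zero]
  exact List.countP_pos_iff.2 ⟨m, hm, by simp [hw]⟩

lemma Rel_visit {d : PySem.Dict String (Bool × Bool)} {v fn : PySem.Set String} {x : String}
    (hrel : RelVF d v fn) (hfv : FVinv d) (hw : visF d x = false) :
    RelVF (d.insert x (true, false)) (PySem.Set.add v x) fn := by
  intro k
  rw [vis_insert, fin_insert]
  by_cases hk : k = x
  · subst hk
    have hnf : k ∉ fn := fun h => by
      have := (hrel k).2.2 h
      rw [hfv k this] at hw; cases hw
    simp [PySem.Set.mem_add, hnf]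
  · simp only [hk, if_false]
    refine ⟨?_, (hrel k).2⟩
    rw [(hrel k).1, PySem.Set.mem_add]
    constructor
    · exact Or.inl
    · rintro (h | rfl)
      · exact h
      · exact absurd rfl hk

lemma Rel_finish {d : PySem.Dict String (Bool × Bool)} {v fn : PySem.Set String} {m : String}
    (hrel : RelVF d v fn) (hv : visF d m = true) :
    RelVF (d.insert m (true, true)) v (PySem.Set.add fn m) := by
  intro k
  rw [vis_insert, fin_insert]
  by_cases hk : k = m
  · subst hk
    simp [PySem.Set.mem_add, (hrel k).1.1 hv]
  · simp only [hk, if_false]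
    refine ⟨(hrel k).1, ?_⟩
    rw [(hrel k).2, PySem.Set.mem_add]
    constructor
    · exact Or.inl
    · rintro (h | rfl)
      · exact h
      · exact absurd rfl hk

lemma FV_visit {d : PySem.Dict String (Bool × Bool)} (hfv : FVinv d) (x : String) :
    FVinv (d.insert x (true, false)) := by
  intro k hk
  rw [fin_insert] at hk
  rw [vis_insert]
  by_cases hkx : k = x
  · simp [hkx]
  · simp only [hkx, if_false] at hk ⊢; exact hfv k hk

-- values of the shared lookup helper come from the pairs of links
lemma pvLk_cases (links : List (String × List String)) (m : String) :
    pvLk links m = [] ∨ ∃ p ∈ links, pvLk links m = p.2 := by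
  induction links with
  | nil => left; rfl
  | cons p rest ih =>
    obtain ⟨pk, pv⟩ := p
    by_cases h : pk == m
    · right
      refine ⟨(pk, pv), List.mem_cons_self .., ?_⟩
      simp [pvLk, PySem.Dict.getD_eq_get?_getD, PySem.Dict.get?_mk_cons, h]
    · have : pvLk ((pk, pv) :: rest) m = pvLk rest m := by
        simp [pvLk, PySem.Dict.getD_eq_get?_getD, PySem.Dict.get?_mk_cons, h]
      rw [this]
      rcases ih with h' | ⟨q, hq, h'⟩
      · exact Or.inl h'
      · exact Or.inr ⟨q, List.mem_cons_of_mem _ hq, h'⟩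

lemma pvLk_subset (links : List (String × List String))
    (hpre : ∀ p ∈ links, ∀ x ∈ p.2, x ∈ links.map Prod.fst) :
    ∀ m x, x ∈ pvLk links m → x ∈ links.map Prod.fst := by
  intro m x hx
  rcases pvLk_cases links m with h | ⟨p, hp, h⟩
  · rw [h] at hx; cases hx
  · rw [h] at hx; exact hpre p hp x hx

lemma contains_eq_false {s : PySem.Set String} {x : String} (h : x ∉ s) :
    PySem.Set.contains s x = false := by
  rw [Bool.eq_false_iff]
  simp [h]

lemma runB_nil (links : List (String × List String)) (f : Nat) (v fn : PySem.Set String)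
    (nb : Int) (e : List (String × String)) :
    runB links f (v, fn, nb, e) [] = (v, fn, nb, e) := by
  conv_lhs => unfold runB

lemma runB_pop (links : List (String × List String)) (f : Nat) (v fn : PySem.Set String)
    (nb : Int) (e) (m : String) (rest) :
    runB links f (v, fn, nb, e) ((m, []) :: rest) =
      runB links f (v, PySem.Set.add fn m, nb, e) rest := by
  conv_lhs => unfold runB

lemma runB_cons (links : List (String × List String)) (f : Nat) (v fn : PySem.Set String)
    (nb : Int) (e) (m dgt : String) (ds : List String) (rest) :
    runB links f (v, fn, nb, e) ((m, dgt :: ds) :: rest) =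
      (if PySem.Set.contains fn dgt then runB links f (v, fn, nb, e) ((m, ds) :: rest)
       else if PySem.Set.contains v dgt then
         runB links f (v, fn, nb + 1, e ++ [(m, dgt)]) ((m, ds) :: rest)
       else
         match f with
         | 0 => (v, fn, nb, e)
         | g + 1 =>
           runB links g (PySem.Set.add v dgt, fn, nb, e)
             ((dgt, pvLk links dgt) :: (m, ds) :: rest)) := by
  conv_lhs => unfold runB

-- the stack machine run on a frame of a visited node m equals A's daughter loop plus finish;
-- the fuel spent is exactly the number of nodes newly visited
lemma SIM (links : List (String × List String))
    (hnd : (links.map Prod.fst).Nodup)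
    (hcl : ∀ m x, x ∈ pvLk links m → x ∈ links.map Prod.fst) :
    ∀ (fA : Nat) (ds : List String) (d : PySem.Dict String (Bool × Bool)) (nb : Int)
      (e : List (String × String)) (m : String) (rest : List (String × List String))
      (f : Nat) (v fn : PySem.Set String),
      RelVF d v fn → FVinv d → visF d m = true →
      (∀ x ∈ ds, x ∈ links.map Prod.fst) →
      Wc links d < fA → Wc links d ≤ f →
      ∃ v' fn',
        RelVF (frameA links fA (d, nb, e) m ds).1 v' fn' ∧
        runB links f (v, fn, nb, e) ((m, ds) :: rest) =
          runB links (f - (Wc links d - Wc links (frameA links fA (d, nb, e) m ds).1))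
            (v', fn', (frameA links fA (d, nb, e) m ds).2.1,
              (frameA links fA (d, nb, e) m ds).2.2) rest := by
  intro fA
  induction fA using Nat.strong_induction_on with
  | _ fA ihA =>
  intro ds
  induction ds with
  | nil =>
    intro d nb e m rest f v fn hrel hfv hm _ hfA hf
    refine ⟨v, PySem.Set.add fn m, Rel_finish hrel hm, ?_⟩
    have hfr : frameA links fA (d, nb, e) m [] = (d.insert m (true, true), nb, e) := rfl
    rw [hfr, runB_pop]
    have hW : Wc links (d.insert m (true, true)) = Wc links d :=
      Wc_congr links (fun k => by
        rw [vis_insert]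
        split
        · next h => rw [h, hm]
        · rfl) |>.symm
    rw [hW, Nat.sub_self, Nat.sub_zero]
  | cons dgt ds ihd =>
    intro d nb e m rest f v fn hrel hfv hm hds hfA hf
    have hdgtU : dgt ∈ links.map Prod.fst := hds dgt (List.mem_cons_self ..)
    have hdstail : ∀ x ∈ ds, x ∈ links.map Prod.fst :=
      fun x hx => hds x (List.mem_cons_of_mem _ hx)
    obtain ⟨fA', rfl⟩ : ∃ fA', fA = fA' + 1 := ⟨fA - 1, by omega⟩
    by_cases hfin : finF d dgt = true
    · -- daughter already finished: both sides skip it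
      have hcf : PySem.Set.contains fn dgt = true :=
        (PySem.Set.contains_iff ..).2 ((hrel dgt).2.1 hfin)
      have hstep : stepA links (fA' + 1) m (d, nb, e) dgt = (d, nb, e) := by
        simp [stepA, dfsA_fin links _ d nb e dgt hfin]
      have hframe : frameA links (fA' + 1) (d, nb, e) m (dgt :: ds) =
          frameA links (fA' + 1) (d, nb, e) m ds := by
        simp only [frameA, loopA, List.foldl_cons, hstep]
      rw [hframe, runB_cons, if_pos hcf]
      exact ihd d nb e m rest f v fn hrel hfv hm hdstail hfA hf
    · rw [Bool.not_eq_true] at hfin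
      have hcf : PySem.Set.contains fn dgt = false :=
        contains_eq_false (fun h => by rw [(hrel dgt).2.2 h] at hfin; cases hfin)
      by_cases hvis : visF d dgt = true
      · -- daughter visited but not finished: a cycle edge
        have hcv : PySem.Set.contains v dgt = true :=
          (PySem.Set.contains_iff ..).2 ((hrel dgt).1.1 hvis)
        have hstep : stepA links (fA' + 1) m (d, nb, e) dgt =
            (d, nb + 1, e ++ [(m, dgt)]) := by
          simp [stepA, dfsA_vis links fA' d nb e dgt hfin hvis]
        have hframe : frameA links (fA' + 1) (d, nb, e) m (dgt :: ds) =
            frameA links (fA' + 1) (d, nb + 1, e ++ [(m, dgt)]) m ds := by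
          simp only [frameA, loopA, List.foldl_cons, hstep]
        rw [hframe, runB_cons, if_neg (by simp only [hcf]; exact Bool.false_ne_true), if_pos hcv]
        exact ihd d (nb + 1) (e ++ [(m, dgt)]) m rest f v fn hrel hfv hm hdstail hfA hf
      · -- white daughter: B pushes a frame, A recurses
        rw [Bool.not_eq_true] at hvis
        have hcv : PySem.Set.contains v dgt = false :=
          contains_eq_false (fun h => by rw [(hrel dgt).1.2 h] at hvis; cases hvis)
        have h1W : 1 ≤ Wc links d := one_le_Wc links hdgtU hvis
        obtain ⟨g, rfl⟩ : ∃ g, f = g + 1 := ⟨f - 1, by omega⟩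
        have hWst1 : Wc links (d.insert dgt (true, false)) + 1 = Wc links d :=
          Wc_insert_white links hnd hdgtU hvis false
        obtain ⟨v1, fn1, hrel1, hrun1⟩ :=
          ihA fA' (by omega) (pvLk links dgt) (d.insert dgt (true, false)) nb e dgt
            ((m, ds) :: rest) g (PySem.Set.add v dgt) fn
            (Rel_visit hrel hfv hvis) (FV_visit hfv dgt) (by simp [vis_insert])
            (fun x hx => hcl dgt x hx) (by omega) (by omega)
        have hdfs : dfsA links (fA' + 1) (d, nb, e) dgt =
            (frameA links fA' (d.insert dgt (true, false), nb, e) dgt (pvLk links dgt),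
              false) := dfsA_white links fA' d nb e dgt hfin hvis
        set out1 := frameA links fA' (d.insert dgt (true, false), nb, e) dgt (pvLk links dgt)
          with hout1
        have hfv1 : FVinv out1.1 := by
          have := (dfs_pres links (fA' + 1) (d, nb, e) dgt).2 hfv
          rwa [hdfs] at this
        have hvism1 : visF out1.1 m = true := by
          have := (dfs_pres links (fA' + 1) (d, nb, e) dgt).1 m hm
          rwa [hdfs] at this
        have hmono1 : ∀ k, visF (d.insert dgt (true, false)) k = true → visF out1.1 k = true :=
          (frame_pres links fA' (dfs_pres links fA') (d.insert dgt (true, false), nb, e)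
            dgt (pvLk links dgt)).1
        have hWout1 : Wc links out1.1 ≤ Wc links (d.insert dgt (true, false)) :=
          Wc_mono links hmono1
        have hstep : stepA links (fA' + 1) m (d, nb, e) dgt = out1 := by
          simp [stepA, hdfs]
        have hframe : frameA links (fA' + 1) (d, nb, e) m (dgt :: ds) =
            frameA links (fA' + 1) out1 m ds := by
          simp only [frameA, loopA, List.foldl_cons, hstep]
        have hWfr : Wc links (frameA links (fA' + 1) out1 m ds).1 ≤ Wc links out1.1 :=
          Wc_mono links
            (frame_pres links (fA' + 1) (dfs_pres links (fA' + 1)) out1 m ds).1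
        obtain ⟨v2, fn2, hrel2, hrun2⟩ :=
          ihd out1.1 out1.2.1 out1.2.2 m rest
            (g - (Wc links (d.insert dgt (true, false)) - Wc links out1.1)) v1 fn1
            hrel1 hfv1 hvism1 hdstail (by omega) (by omega)
        rw [show ((out1.1, out1.2.1, out1.2.2) :
            PySem.Dict String (Bool × Bool) × Int × List (String × String)) = out1
          from rfl] at hrel2 hrun2
        refine ⟨v2, fn2, by rw [hframe]; exact hrel2, ?_⟩
        rw [runB_cons, if_neg (by simp only [hcf]; exact Bool.false_ne_true), if_neg (by simp only [hcv]; exact Bool.false_ne_true)]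
        rw [show (match g + 1 with
            | 0 => (v, fn, nb, e)
            | g + 1 => runB links g (PySem.Set.add v dgt, fn, nb, e)
                ((dgt, pvLk links dgt) :: (m, ds) :: rest)) =
          runB links g (PySem.Set.add v dgt, fn, nb, e)
            ((dgt, pvLk links dgt) :: (m, ds) :: rest) from rfl]
        rw [hrun1, hrun2, hframe]
        congr 1
        omega

lemma init_getD (l : List (String × List String)) :
    ∀ (d0 : PySem.Dict String (Bool × Bool)) (k : String),
      d0.getD k (false, false) = (false, false) →
      (l.foldl (fun d p => d.insert p.1 (false, false)) d0).getD k (false, false) =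
        (false, false) := by
  induction l with
  | nil => exact fun d0 k h => h
  | cons p l ih =>
    intro d0 k h
    rw [List.foldl_cons]
    apply ih
    rw [PySem.Dict.getD_insert]
    split
    · rfl
    · exact h

-- the outer 'for node in links' loops of the two programs, in lockstep
lemma OUT (links : List (String × List String))
    (hnd : (links.map Prod.fst).Nodup)
    (hcl : ∀ m x, x ∈ pvLk links m → x ∈ links.map Prod.fst) :
    ∀ (ps : List (String × List String)) (d : PySem.Dict String (Bool × Bool)) (nb : Int)
      (e : List (String × String)) (v fn : PySem.Set String),
      RelVF d v fn → FVinv d → (∀ p ∈ ps, p.1 ∈ links.map Prod.fst) →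
      ∃ v' fn',
        RelVF (ps.foldl (fun st p => (dfsA links (links.length + 1) st p.1).1) (d, nb, e)).1
          v' fn' ∧
        FVinv (ps.foldl (fun st p => (dfsA links (links.length + 1) st p.1).1) (d, nb, e)).1 ∧
        ps.foldl
          (fun st p =>
            if PySem.Set.contains st.2.1 p.1 then st
            else if PySem.Set.contains st.1 p.1 then (st.1, st.2.1, st.2.2.1 + 1, st.2.2.2)
            else runB links links.length
              (PySem.Set.add st.1 p.1, st.2.1, st.2.2.1, st.2.2.2) [(p.1, pvLk links p.1)])
          (v, fn, nb, e) =
          (v', fn',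
            (ps.foldl (fun st p => (dfsA links (links.length + 1) st p.1).1) (d, nb, e)).2.1,
            (ps.foldl (fun st p => (dfsA links (links.length + 1) st p.1).1) (d, nb, e)).2.2) := by
  intro ps
  induction ps with
  | nil => exact fun d nb e v fn hrel hfv _ => ⟨v, fn, hrel, hfv, rfl⟩
  | cons p ps ih =>
    intro d nb e v fn hrel hfv hps
    have hpU : p.1 ∈ links.map Prod.fst := hps p (List.mem_cons_self ..)
    have hpst : ∀ q ∈ ps, q.1 ∈ links.map Prod.fst :=
      fun q hq => hps q (List.mem_cons_of_mem _ hq)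
    simp only [List.foldl_cons]
    by_cases hfin : finF d p.1 = true
    · have hcf : PySem.Set.contains fn p.1 = true :=
        (PySem.Set.contains_iff ..).2 ((hrel p.1).2.1 hfin)
      rw [dfsA_fin links _ d nb e p.1 hfin, if_pos hcf]
      exact ih d nb e v fn hrel hfv hpst
    · rw [Bool.not_eq_true] at hfin
      have hcf : PySem.Set.contains fn p.1 = false :=
        contains_eq_false (fun h => by rw [(hrel p.1).2.2 h] at hfin; cases hfin)
      by_cases hvis : visF d p.1 = true
      · have hcv : PySem.Set.contains v p.1 = true :=
          (PySem.Set.contains_iff ..).2 ((hrel p.1).1.1 hvis)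
        rw [dfsA_vis links links.length d nb e p.1 hfin hvis,
          if_neg (by simp only [hcf]; exact Bool.false_ne_true), if_pos hcv]
        exact ih d (nb + 1) e v fn hrel hfv hpst
      · rw [Bool.not_eq_true] at hvis
        have hcv : PySem.Set.contains v p.1 = false :=
          contains_eq_false (fun h => by rw [(hrel p.1).1.2 h] at hvis; cases hvis)
        have h1W : 1 ≤ Wc links d := one_le_Wc links hpU hvis
        have hWle : Wc links d ≤ links.length := Wc_le links d
        have hlen : 1 ≤ links.length := by
          rcases List.mem_map.1 hpU with ⟨q, hq, _⟩
          exact List.length_pos_of_mem hq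
        have hWst1 : Wc links (d.insert p.1 (true, false)) + 1 = Wc links d :=
          Wc_insert_white links hnd hpU hvis false
        obtain ⟨v1, fn1, hrel1, hrun1⟩ :=
          SIM links hnd hcl links.length (pvLk links p.1) (d.insert p.1 (true, false)) nb e
            p.1 [] links.length (PySem.Set.add v p.1) fn
            (Rel_visit hrel hfv hvis) (FV_visit hfv p.1) (by simp [vis_insert])
            (fun x hx => hcl p.1 x hx) (by omega) (by omega)
        have hdfs : dfsA links (links.length + 1) (d, nb, e) p.1 =
            (frameA links links.length (d.insert p.1 (true, false), nb, e) p.1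
              (pvLk links p.1), false) := dfsA_white links links.length d nb e p.1 hfin hvis
        set fr := frameA links links.length (d.insert p.1 (true, false), nb, e) p.1
          (pvLk links p.1) with hfr
        have hfv' : FVinv fr.1 := by
          have := (dfs_pres links (links.length + 1) (d, nb, e) p.1).2 hfv
          rwa [hdfs] at this
        rw [hdfs, if_neg (by simp only [hcf]; exact Bool.false_ne_true),
          if_neg (by simp only [hcv]; exact Bool.false_ne_true)]
        rw [runB_nil] at hrun1
        rw [hrun1]
        obtain ⟨v2, fn2, hrel2, hfv2, hB⟩ := ih fr.1 fr.2.1 fr.2.2 v1 fn1 hrel1 hfv' hpst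
        rw [show ((fr.1, fr.2.1, fr.2.2) :
            PySem.Dict String (Bool × Bool) × Int × List (String × String)) = fr
          from rfl] at hrel2 hfv2 hB
        exact ⟨v2, fn2, hrel2, hfv2, hB⟩

-- ===== VERDICT (by name: the statement is the Claim_ definition above) =====
theorem get_number_cycles_spec : Claim_equal_get_number_cycles := by
  intro links _ hpre
  unfold Spec_get_number_cycles
  have hcl := pvLk_subset links hpre.2
  have hinit : ∀ k,
      (links.foldl (fun d p => d.insert p.1 (false, false)) PySem.Dict.empty).getD k
        (false, false) = (false, false) :=
    fun k => init_getD links PySem.Dict.empty k (by rw [PySem.Dict.getD_empty])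
  have hrel : RelVF (links.foldl (fun d p => d.insert p.1 (false, false)) PySem.Dict.empty)
      PySem.Set.empty PySem.Set.empty := by
    intro k
    simp [visF, finF, hinit k, PySem.Set.empty]
  have hfv : FVinv (links.foldl (fun d p => d.insert p.1 (false, false)) PySem.Dict.empty) :=
    fun k hk => by rw [finF, hinit k] at hk; cases hk
  obtain ⟨v', fn', _, _, hB⟩ :=
    OUT links hpre.1 hcl links _ 0 [] PySem.Set.empty PySem.Set.empty hrel hfv
      (fun p hp => List.mem_map_of_mem hp)
  simp only [get_number_cycles, get_number_cycles_alt]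
  rw [hB]
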